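-- pv_equiv track=rewrite | github.com/czhnju161220026/LearnPython | leetcode/problem_726.py | nextAtom
-- ===== SOURCE A (Python) =====
-- def nextAtom(formula: str, begin: int):
--     atom = formula[begin]
--     begin += 1
--     if begin >= len(formula):
--         return atom, begin
--     while begin < len(formula) and formula[begin].islower():
--         atom += formula[begin]
--         begin += 1
--     return atom, begin
-- ===== SOURCE B (Python) =====
-- def nextAtom(formula: str, begin: int):
--     first = formula[begin]
--     tail = formula[begin + 1:]
--     k = next((i for i, c in enumerate(tail) if not c.islower()), len(tail))
--     return first + tail[:k], begin + 1 + k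
-- ===== Notes on version B (the rewrite author's own statement) =====
-- stated objective: idiomatic
-- what changed: Instead of accumulating the atom character by character while advancing an index with an early-return branch, B slices the tail after the first character once, finds the length of its lowercase prefix with a single next/enumerate search, and returns the slice and end index arithmetically.
-- intended difference: When begin is -2 or smaller, the tail from that negatively indexed position to the end of the string is all lowercase, and the string's first character is lowercase, A's scan wraps past the end and accidentally re-reads the string from index 0 -- for formula 'ab' with begin -2 A returns atom 'abab' with end index 2 -- whereas B stops at the end of the string and returns atom 'ab' with end index 0, the intended reading of an atom starting at a negative position. — e.g. on nextAtom("ab", -2): A returns ("abab", 2), B returns ("ab", 0)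
import Mathlib
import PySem

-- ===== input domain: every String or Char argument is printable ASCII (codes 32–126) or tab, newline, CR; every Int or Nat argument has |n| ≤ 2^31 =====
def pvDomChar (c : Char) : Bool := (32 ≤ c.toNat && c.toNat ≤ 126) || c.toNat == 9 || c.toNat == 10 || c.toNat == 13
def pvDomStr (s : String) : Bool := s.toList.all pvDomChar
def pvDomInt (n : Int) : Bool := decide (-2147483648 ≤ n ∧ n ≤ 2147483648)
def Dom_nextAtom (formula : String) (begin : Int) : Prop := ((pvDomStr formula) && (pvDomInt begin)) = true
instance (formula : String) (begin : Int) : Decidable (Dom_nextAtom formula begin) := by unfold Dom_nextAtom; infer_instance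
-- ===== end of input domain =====

-- B replaces A's accumulate-and-advance while-loop by: slice the tail once, measure its
-- lowercase prefix with a single search, return slice and end index arithmetically.

-- ===== PORT A =====
-- the while loop: 'while begin < len(formula) and formula[begin].islower(): atom += formula[begin]; begin += 1'
def nextAtomGo (l : List Char) (bg : Int) (atom : List Char) : List Char × Int :=
  if h : bg < (l.length : Int) then
    match PySem.List.pyGet? l bg with
    | some c =>
      if PySem.Chars.islower c then
        nextAtomGo l (bg + 1) (atom ++ [c])
      else (atom, bg)
    | none => (atom, bg)   -- IndexError; unreachable from inputs satisfying Pre_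
  else (atom, bg)
termination_by ((l.length : Int) - bg).toNat
decreasing_by omega

def nextAtom (formula : String) (begin : Int) : String × Int :=
  match PySem.List.pyGet? formula.toList begin with
  | none => ("", begin)   -- formula[begin] raises IndexError here (outside Pre_)
  | some c =>
    let b1 := begin + 1
    if b1 ≥ (formula.toList.length : Int) then (String.mk [c], b1)
    else
      let r := nextAtomGo formula.toList b1 [c]
      (String.mk r.1, r.2)

-- ===== PORT B =====
def nextAtom_alt (formula : String) (begin : Int) : String × Int :=
  match PySem.List.pyGet? formula.toList begin with
  | none => ("", begin)   -- formula[begin] raises IndexError here (outside Pre_)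
  | some first =>
    let tail := PySem.List.slice formula.toList (some (begin + 1)) none
    -- next((i for i, c in enumerate(tail) if not c.islower()), len(tail))
    let k := tail.findIdx (fun c => !(PySem.Chars.islower c))
    (String.mk (first :: tail.take k), begin + 1 + (k : Int))

-- ===== PRECONDITION & SPEC =====
-- Pre_ excludes exactly the out-of-range indices on which formula[begin] raises IndexError.
def Pre_nextAtom (formula : String) (begin : Int) : Prop :=
  -(formula.toList.length : Int) ≤ begin ∧ begin < (formula.toList.length : Int)
instance (formula : String) (begin : Int) : Decidable (Pre_nextAtom formula begin) := by
  unfold Pre_nextAtom; infer_instance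
def pvWitness_nextAtom : String × Int := ("He", 0)

-- For begin ≤ -2 (a negative start) whose tail to the end of the string is all lowercase and
-- whose string starts with a lowercase letter, A's scan wraps past the end and accidentally
-- re-reads the string from index 0 (for formula "ab" with begin -2 it returns atom "abab" with
-- end index 2); B stops at the end of the string (atom "ab" with end index 0), the intended
-- 'atom starting at this position' reading of a negative index.
def D_nextAtom (formula : String) (begin : Int) : Prop :=
  begin < -1 ∧ -(formula.toList.length : Int) ≤ begin ∧
  (formula.toList.drop (formula.toList.length - ((-begin).toNat - 1))).all PySem.Chars.islower = true ∧
  (formula.toList[0]?.any PySem.Chars.islower) = true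
instance (formula : String) (begin : Int) : Decidable (D_nextAtom formula begin) := by
  unfold D_nextAtom; infer_instance

def Spec_nextAtom (formula : String) (begin : Int) (out : String × Int) : Prop :=
  ¬ D_nextAtom formula begin → out = nextAtom_alt formula begin
instance (formula : String) (begin : Int) (out : String × Int) : Decidable (Spec_nextAtom formula begin out) := by
  unfold Spec_nextAtom; infer_instance

def pvDiffWitness_nextAtom : String × Int := ("ab", -2)
def pvDiffWitnessOut_nextAtom : (String × Int) × (String × Int) := (("abab", 2), ("ab", 0))

-- ===== CLAIM (what is proved, stated in full; the proofs are below) =====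
def Claim_unchanged_nextAtom : Prop := ∀ (formula : String) (begin : Int), Dom_nextAtom formula begin → Pre_nextAtom formula begin → Spec_nextAtom formula begin (nextAtom formula begin)
def Claim_changed_nextAtom : Prop := Dom_nextAtom (pvDiffWitness_nextAtom.1) (pvDiffWitness_nextAtom.2) ∧ Pre_nextAtom (pvDiffWitness_nextAtom.1) (pvDiffWitness_nextAtom.2) ∧ D_nextAtom (pvDiffWitness_nextAtom.1) (pvDiffWitness_nextAtom.2) ∧ nextAtom (pvDiffWitness_nextAtom.1) (pvDiffWitness_nextAtom.2) = pvDiffWitnessOut_nextAtom.1 ∧ nextAtom_alt (pvDiffWitness_nextAtom.1) (pvDiffWitness_nextAtom.2) = pvDiffWitnessOut_nextAtom.2 ∧ pvDiffWitnessOut_nextAtom.1 ≠ pvDiffWitnessOut_nextAtom.2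
def Claim_exact_nextAtom : Prop := ∀ (formula : String) (begin : Int), Dom_nextAtom formula begin → Pre_nextAtom formula begin → D_nextAtom formula begin → nextAtom formula begin ≠ nextAtom_alt formula begin

-- ===== LEMMAS AND PROOFS =====

theorem findIdx_not_eq_length_takeWhile (p : Char → Bool) (l : List Char) :
    l.findIdx (fun c => !(p c)) = (l.takeWhile p).length := by
  induction l with
  | nil => simp
  | cons a l ih =>
    by_cases h : p a
    · simp [List.findIdx_cons, h, ih]
    · simp [List.findIdx_cons, h]

theorem take_length_takeWhile (p : Char → Bool) (l : List Char) :
    l.take (l.takeWhile p).length = l.takeWhile p :=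
  (List.prefix_iff_eq_take.mp (List.takeWhile_prefix p)).symm

theorem go_nonneg (l : List Char) (j : Nat) (hj : j ≤ l.length) (atom : List Char) :
    nextAtomGo l (j : Int) atom =
      (atom ++ (l.drop j).takeWhile PySem.Chars.islower,
       (j : Int) + (((l.drop j).takeWhile PySem.Chars.islower).length : Int)) := by
  by_cases h : j < l.length
  · rw [nextAtomGo]
    have hg : PySem.List.pyGet? l (j : Int) = some l[j] := by
      simp [PySem.List.pyGet?_natCast, List.getElem?_eq_getElem h]
    have hdrop : l.drop j = l[j] :: l.drop (j + 1) := (List.drop_eq_getElem_cons h)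
    rw [dif_pos (show (j : Int) < (l.length : Int) by exact_mod_cast h), hg]
    by_cases hl : PySem.Chars.islower l[j]
    · simp only [hl, if_true]
      have hc : (j : Int) + 1 = ((j + 1 : Nat) : Int) := by push_cast; ring
      rw [hc, go_nonneg l (j + 1) (by omega) (atom ++ [l[j]]), hdrop, List.takeWhile_cons, hl]
      refine Prod.ext ?_ ?_
      · simp
      · simp; push_cast; ring
    · simp only [hl, if_false]
      rw [hdrop]
      simp [List.takeWhile_cons, hl]
  · have hje : j = l.length := by omega
    rw [nextAtomGo]
    simp [hje]
termination_by l.length - j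
decreasing_by omega

theorem go_zero (l : List Char) (atom : List Char) :
    nextAtomGo l (0 : Int) atom =
      (atom ++ l.takeWhile PySem.Chars.islower,
       ((l.takeWhile PySem.Chars.islower).length : Int)) := by
  have h := go_nonneg l 0 (Nat.zero_le _) atom
  simpa using h

theorem go_neg (l : List Char) (k : Nat) (hk1 : 1 ≤ k) (hk : k ≤ l.length) (atom : List Char) :
    nextAtomGo l (-(k : Int)) atom =
      (if (l.drop (l.length - k)).all PySem.Chars.islower
       then nextAtomGo l 0 (atom ++ l.drop (l.length - k))
       else (atom ++ (l.drop (l.length - k)).takeWhile PySem.Chars.islower,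
             -(k : Int) + (((l.drop (l.length - k)).takeWhile PySem.Chars.islower).length : Int))) := by
  induction k generalizing atom with
  | zero => omega
  | succ k ih =>
    have hlen : 0 < l.length := by omega
    rw [nextAtomGo]
    have hlt : -((k + 1 : Nat) : Int) < (l.length : Int) := by push_cast; omega
    have hbound : l.length - (k + 1) < l.length := by omega
    have hg : PySem.List.pyGet? l (-((k + 1 : Nat) : Int)) = some (l[l.length - (k + 1)]'hbound) := by
      rw [PySem.List.pyGet?_neg_natCast l (k + 1) (by omega) (by exact_mod_cast hk)]
      exact List.getElem?_eq_getElem hbound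
    have hdrop : l.drop (l.length - (k + 1)) = (l[l.length - (k + 1)]'hbound) :: l.drop (l.length - k) := by
      have h' : l.length - (k + 1) + 1 = l.length - k := by omega
      rw [List.drop_eq_getElem_cons hbound, h']
    rw [dif_pos hlt, hg]
    by_cases hl : PySem.Chars.islower (l[l.length - (k + 1)]'hbound)
    · simp only [hl, if_true]
      have hstep : -((k + 1 : Nat) : Int) + 1 = -(k : Int) := by push_cast; ring
      rw [hstep]
      by_cases hk0 : k = 0
      · subst hk0
        rw [hdrop]
        simp [List.all_cons, hl, List.takeWhile_cons]
      · rw [ih (by omega) (by omega)]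
        rw [hdrop]
        simp only [List.all_cons, hl, Bool.true_and, List.takeWhile_cons, if_true]
        by_cases hall : (l.drop (l.length - k)).all PySem.Chars.islower
        · simp [hall]
        · simp only [hall, if_false]
          refine Prod.ext ?_ ?_
          · simp
          · simp; push_cast; ring
    · simp only [hl, if_false]
      rw [hdrop]
      have hall : (((l[l.length - (k + 1)]'hbound) :: l.drop (l.length - k)).all PySem.Chars.islower) = false := by
        simp [List.all_cons, hl]
      rw [hall]
      simp [List.takeWhile_cons, hl]

-- B's value, written over the dropped tail
theorem alt_eq (formula : String) (begin : Int) (c : Char)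
    (hg : PySem.List.pyGet? formula.toList begin = some c) (q : Nat)
    (hq : PySem.List.clampIdx formula.toList.length (begin + 1) = q) :
    nextAtom_alt formula begin =
      (String.mk (c :: (formula.toList.drop q).takeWhile PySem.Chars.islower),
       begin + 1 + (((formula.toList.drop q).takeWhile PySem.Chars.islower).length : Int)) := by
  unfold nextAtom_alt
  rw [hg]
  simp only [PySem.List.slice_some_none, hq,
    findIdx_not_eq_length_takeWhile PySem.Chars.islower, take_length_takeWhile]

theorem unchanged (formula : String) (begin : Int)
    (hpre : Pre_nextAtom formula begin) (hnd : ¬ D_nextAtom formula begin) :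
    nextAtom formula begin = nextAtom_alt formula begin := by
  obtain ⟨h1, h2⟩ := hpre
  have hlenpos : 0 < formula.toList.length := by omega
  by_cases hbneg : 0 ≤ begin
  · -- nonnegative begin: both scan the suffix after position begin
    obtain ⟨j, hj⟩ : ∃ j : Nat, (j : Int) = begin := ⟨begin.toNat, Int.toNat_of_nonneg hbneg⟩
    have hjlt : j < formula.toList.length := by omega
    have hg : PySem.List.pyGet? formula.toList begin = some (formula.toList[j]'hjlt) := by
      rw [← hj]
      simp [PySem.List.pyGet?_natCast, List.getElem?_eq_getElem hjlt]
    have hq : PySem.List.clampIdx formula.toList.length (begin + 1) = j + 1 := by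
      have h' : begin + 1 = ((j + 1 : Nat) : Int) := by push_cast; omega
      rw [h', PySem.List.clampIdx_natCast]
      omega
    rw [alt_eq formula begin (formula.toList[j]'hjlt) hg (j + 1) hq]
    unfold nextAtom
    rw [hg]
    dsimp only
    by_cases hend : begin + 1 ≥ (formula.toList.length : Int)
    · have hde : formula.toList.drop (j + 1) = [] := by
        apply List.drop_eq_nil_of_le; omega
      rw [if_pos hend, hde]
      simp
    · rw [if_neg hend]
      have h' : begin + 1 = ((j + 1 : Nat) : Int) := by push_cast; omega
      rw [h', go_nonneg formula.toList (j + 1) (by omega) _]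
      refine Prod.ext ?_ ?_
      · simp
      · simp <;> (push_cast; ring)
  · -- negative begin
    obtain ⟨k, hk, hk1, hkle⟩ : ∃ k : Nat, begin = -(k : Int) ∧ 1 ≤ k ∧ k ≤ formula.toList.length := by
      refine ⟨(-begin).toNat, by omega, by omega, by omega⟩
    have hbound : formula.toList.length - k < formula.toList.length := by omega
    have hg : PySem.List.pyGet? formula.toList begin = some (formula.toList[formula.toList.length - k]'hbound) := by
      rw [hk, PySem.List.pyGet?_neg_natCast formula.toList k (by omega) hkle]
      exact List.getElem?_eq_getElem hbound
    by_cases hk1' : k = 1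
    · -- begin = -1: B's tail is the whole string, A continues from index 0
      have hq : PySem.List.clampIdx formula.toList.length (begin + 1) = 0 := by
        have h' : begin + 1 = ((0 : Nat) : Int) := by omega
        rw [h', PySem.List.clampIdx_natCast]
        omega
      rw [alt_eq formula begin _ hg 0 hq]
      unfold nextAtom
      rw [hg]
      dsimp only
      have hend : ¬ (begin + 1 ≥ (formula.toList.length : Int)) := by omega
      rw [if_neg hend]
      have h'0 : begin + 1 = (0 : Int) := by omega
      rw [h'0, go_zero]
      refine Prod.ext ?_ ?_
      · simp
      · simp <;> omega
    · -- begin ≤ -2: ¬D_ means the suffix is not all lowercase or the head is not lowercase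
      have hk2 : 2 ≤ k := by omega
      have hq : PySem.List.clampIdx formula.toList.length (begin + 1) = formula.toList.length - (k - 1) := by
        have h' : begin + 1 = -(((k - 1 : Nat)) : Int) := by push_cast; omega
        rw [h', PySem.List.clampIdx_neg_natCast formula.toList.length (k - 1) (by omega)]
      rw [alt_eq formula begin _ hg (formula.toList.length - (k - 1)) hq]
      unfold nextAtom
      rw [hg]
      dsimp only
      have hend : ¬ (begin + 1 ≥ (formula.toList.length : Int)) := by omega
      rw [if_neg hend]
      have h' : begin + 1 = -(((k - 1 : Nat)) : Int) := by push_cast; omega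
      rw [h', go_neg formula.toList (k - 1) (by omega) (by omega) _]
      by_cases hall : (formula.toList.drop (formula.toList.length - (k - 1))).all PySem.Chars.islower
      · -- suffix all lowercase; ¬D_ forces the head not lowercase
        have hD1 : begin < -1 := by omega
        have hkk : (-begin).toNat - 1 = k - 1 := by omega
        have h0 : ¬ ((formula.toList[0]?).any PySem.Chars.islower = true) := by
          intro h0'
          exact hnd ⟨hD1, h1, by rw [hkk]; exact hall, h0'⟩
        have h0' : PySem.Chars.islower (formula.toList[0]'hlenpos) = false := by
          by_contra hb
          simp only [Bool.not_eq_false] at hb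
          exact h0 (by simp [List.getElem?_eq_getElem hlenpos, hb])
        rw [if_pos hall, go_zero]
        have htw : formula.toList.takeWhile PySem.Chars.islower = [] := by
          cases hl' : formula.toList with
          | nil => simp [hl'] at hlenpos
          | cons a t =>
            have ha : a = formula.toList[0]'hlenpos := by simp [hl']
            rw [List.takeWhile_cons, ha, h0']
            simp
        have hta : (formula.toList.drop (formula.toList.length - (k - 1))).takeWhile PySem.Chars.islower
            = formula.toList.drop (formula.toList.length - (k - 1)) := List.takeWhile_eq_self_iff.mpr (by
          intro a ha; exact (List.all_eq_true.mp hall) a ha)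
        rw [htw, hta]
        refine Prod.ext ?_ ?_
        · simp
        · simp only [List.length_drop, List.length_nil, List.append_nil]
          push_cast; omega
      · -- suffix has a non-lowercase character: both stop inside the suffix
        rw [if_neg hall]
        refine Prod.ext ?_ ?_
        · simp
        · simp <;> (push_cast; omega)

-- Under D_, A's end index is positive while B's is 0.
theorem changed_all (formula : String) (begin : Int)
    (hpre : Pre_nextAtom formula begin) (hd : D_nextAtom formula begin) :
    nextAtom formula begin ≠ nextAtom_alt formula begin := by
  obtain ⟨h1, h2⟩ := hpre
  obtain ⟨hD1, _, hDall, hD0⟩ := hd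
  have hlenpos : 0 < formula.toList.length := by omega
  obtain ⟨k, hk, hk2, hkle⟩ : ∃ k : Nat, begin = -(k : Int) ∧ 2 ≤ k ∧ k ≤ formula.toList.length := by
    refine ⟨(-begin).toNat, by omega, by omega, by omega⟩
  have hkk : (-begin).toNat - 1 = k - 1 := by omega
  have hall : (formula.toList.drop (formula.toList.length - (k - 1))).all PySem.Chars.islower := by
    rw [← hkk]; exact hDall
  have h0 : PySem.Chars.islower (formula.toList[0]'hlenpos) = true := by
    rw [List.getElem?_eq_getElem hlenpos] at hD0
    simpa using hD0
  have hbound : formula.toList.length - k < formula.toList.length := by omega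
  have hg : PySem.List.pyGet? formula.toList begin = some (formula.toList[formula.toList.length - k]'hbound) := by
    rw [hk, PySem.List.pyGet?_neg_natCast formula.toList k (by omega) hkle]
    exact List.getElem?_eq_getElem hbound
  have hq : PySem.List.clampIdx formula.toList.length (begin + 1) = formula.toList.length - (k - 1) := by
    have h' : begin + 1 = -(((k - 1 : Nat)) : Int) := by push_cast; omega
    rw [h', PySem.List.clampIdx_neg_natCast formula.toList.length (k - 1) (by omega)]
  -- B's end index is 0
  have hB : (nextAtom_alt formula begin).2 = 0 := by
    rw [alt_eq formula begin _ hg (formula.toList.length - (k - 1)) hq]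
    have hta : (formula.toList.drop (formula.toList.length - (k - 1))).takeWhile PySem.Chars.islower
        = formula.toList.drop (formula.toList.length - (k - 1)) := List.takeWhile_eq_self_iff.mpr (by
      intro a ha; exact (List.all_eq_true.mp hall) a ha)
    rw [hta]
    simp only [List.length_drop]
    push_cast; omega
  -- A's end index is positive
  have hA : 0 < (nextAtom formula begin).2 := by
    unfold nextAtom
    rw [hg]
    dsimp only
    have hend : ¬ (begin + 1 ≥ (formula.toList.length : Int)) := by omega
    rw [if_neg hend]
    have h' : begin + 1 = -(((k - 1 : Nat)) : Int) := by push_cast; omega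
    rw [h', go_neg formula.toList (k - 1) (by omega) (by omega) _, if_pos hall, go_zero]
    have htw : 0 < (formula.toList.takeWhile PySem.Chars.islower).length := by
      cases hl' : formula.toList with
      | nil => simp [hl'] at hlenpos
      | cons a t =>
        have ha : a = formula.toList[0]'hlenpos := by simp [hl']
        rw [List.takeWhile_cons, ha, h0]
        simp
    push_cast; omega
  intro he
  rw [he, hB] at hA
  exact lt_irrefl 0 hA

theorem witnessA : nextAtom "ab" (-2) = ("abab", 2) := by
  unfold nextAtom
  rw [show PySem.List.pyGet? "ab".toList (-2) = some 'a' from by decide]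
  dsimp only
  rw [if_neg (by decide)]
  rw [show (-2 : Int) + 1 = -((1 : Nat) : Int) from by decide]
  rw [go_neg "ab".toList 1 (by decide) (by decide)]
  rw [if_pos (by decide)]
  rw [go_zero]
  decide

-- ===== VERDICT (by name: the statement is the Claim_ definition above) =====
theorem nextAtom_spec : Claim_unchanged_nextAtom := by
  intro formula begin _ hpre hnd
  exact unchanged formula begin hpre hnd

theorem nextAtom_changed : Claim_changed_nextAtom := by
  unfold Claim_changed_nextAtom
  exact ⟨by decide, by decide, by decide, witnessA, by decide, by decide⟩

theorem nextAtom_tight : Claim_exact_nextAtom := by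
  intro formula begin _ hpre hd
  exact changed_all formula begin hpre hd
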